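-- pv_equiv track=rewrite | github.com/kwoneyng/beakjoon | 호텔 방배정 re.py | find
-- ===== SOURCE A (Python) =====
-- def find(n,ht):
--     if ht[n] == n:
--         ht[n] += 1
--         return n
--     else:
--         room = find(ht[n],ht)
--         ht[n] = room + 1
--         return room
-- ===== SOURCE B (Python) =====
-- def find(n, ht):
--     # Iterative find with the same path-compression write-back as the recursive version.
--     path = []
--     x = n
--     while ht[x] != x:
--         path.append(x)
--         x = ht[x]
--     room = x
--     ht[x] = room + 1
--     for y in path:
--         ht[y] = room + 1
--     return room
-- ===== Notes on version B (the rewrite author's own statement) =====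
-- stated objective: alternative
-- what changed: Replaces the recursive chase-and-unwind with an explicit iterative loop that records the visited path in a list and writes room+1 back to the root and every path node afterwards, so no recursion (and no RecursionError on long chains).
import Mathlib
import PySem

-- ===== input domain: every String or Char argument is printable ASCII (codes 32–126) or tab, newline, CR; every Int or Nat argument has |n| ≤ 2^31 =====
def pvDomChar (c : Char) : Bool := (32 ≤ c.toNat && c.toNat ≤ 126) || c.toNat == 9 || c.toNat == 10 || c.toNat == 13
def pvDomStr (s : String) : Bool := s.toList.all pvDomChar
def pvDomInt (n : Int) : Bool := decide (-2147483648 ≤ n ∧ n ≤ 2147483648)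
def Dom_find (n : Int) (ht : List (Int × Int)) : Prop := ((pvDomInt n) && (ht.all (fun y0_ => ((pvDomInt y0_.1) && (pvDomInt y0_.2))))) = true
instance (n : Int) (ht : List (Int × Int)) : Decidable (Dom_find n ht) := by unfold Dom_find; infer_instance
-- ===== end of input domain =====

-- B replaces A's recursive chase-and-unwind by an iterative loop with an explicit path list;
-- both mutate the Python dict identically (root and path set to room+1): the equivalence proved
-- here is about the RETURN value (the dict argument is threaded, not returned).

-- ===== PORT A =====
-- Recursive A, fuel-guarded for totality (fuel = |ht| + 1 always suffices inside Pre_find);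
-- returns (room, updated dict); none = KeyError / fuel exhausted (excluded by Pre_find).
def findA : Nat → Int → PySem.Dict Int Int → Option (Int × PySem.Dict Int Int)
  | 0, _, _ => none
  | fuel + 1, n, ht =>
    match ht.get? n with
    | none => none
    | some v =>
      if v = n then
        some (n, ht.insert n (n + 1))
      else
        match findA fuel v ht with
        | none => none
        | some (room, ht') => some (room, ht'.insert n (room + 1))

def find (n : Int) (ht : List (Int × Int)) : Int :=
  match findA (ht.length + 1) n (PySem.Dict.mk ht) with
  | some (room, _) => room
  | none => 0

-- ===== PORT B =====
-- Iterative chase: accumulate the path, stop at the self-loop; none = KeyError / fuel exhausted.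
def findBloop : Nat → Int → PySem.Dict Int Int → List Int → Option (Int × List Int)
  | 0, _, _, _ => none
  | fuel + 1, x, ht, path =>
    match ht.get? x with
    | none => none
    | some v =>
      if v = x then some (x, path)
      else findBloop fuel v ht (path ++ [x])

def find_alt (n : Int) (ht : List (Int × Int)) : Int :=
  match findBloop (ht.length + 1) n (PySem.Dict.mk ht) [] with
  | some (room, path) =>
    -- write-back: ht[root] = room+1, then ht[y] = room+1 for y in path (return value unaffected)
    let _ := path.foldl (fun d y => d.insert y (room + 1))
      ((PySem.Dict.mk ht).insert room (room + 1))
    room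
  | none => 0

-- ===== PRECONDITION & SPEC =====
-- Pre_find holds exactly where the Python A returns: following the pointer map from n, every
-- visited node is a key of ht and some iterate (at most |ht| steps) reaches a self-loop room;
-- otherwise A raises KeyError or recurses forever.
def Pre_find (n : Int) (ht : List (Int × Int)) : Prop :=
  ∃ m, m ≤ ht.length ∧
    (∀ j, j ≤ m → ((PySem.Dict.mk ht).contains
        ((fun x => (PySem.Dict.mk ht).getD x x)^[j] n)) = true) ∧
    (PySem.Dict.mk ht).get? ((fun x => (PySem.Dict.mk ht).getD x x)^[m] n) =
      some ((fun x => (PySem.Dict.mk ht).getD x x)^[m] n)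
instance (n : Int) (ht : List (Int × Int)) : Decidable (Pre_find n ht) := by
  unfold Pre_find; infer_instance

def pvWitness_find : Int × (List (Int × Int)) := (3, [(3, 5), (5, 5), (7, 7)])

def Spec_find (n : Int) (ht : List (Int × Int)) (out : Int) : Prop := out = find_alt n ht
instance (n : Int) (ht : List (Int × Int)) (out : Int) : Decidable (Spec_find n ht out) := by
  unfold Spec_find; infer_instance

-- ===== CLAIM (what is proved, stated in full; the proofs are below) =====
def Claim_equal_find : Prop :=
  ∀ (n : Int) (ht : List (Int × Int)), Dom_find n ht → Pre_find n ht → Spec_find n ht (find n ht)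

-- ===== LEMMAS AND PROOFS =====
-- The two fuel-guarded chases return the same room (for any accumulated path).
theorem findA_fst_eq_findBloop (fuel : Nat) :
    ∀ (n : Int) (ht : PySem.Dict Int Int) (path : List Int),
      (findA fuel n ht).map Prod.fst = (findBloop fuel n ht path).map Prod.fst := by
  induction fuel with
  | zero => intro n ht path; rfl
  | succ f ih =>
    intro n ht path
    simp only [findA, findBloop]
    cases h : ht.get? n with
    | none => rfl
    | some v =>
      by_cases hv : v = n
      · simp [hv]
      · simp only [if_neg hv]
        have := ih v ht (path ++ [n])
        cases hA : findA f v ht with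
        | none => rw [hA] at this; cases hB : findBloop f v ht (path ++ [n]) with
          | none => rfl
          | some q => rw [hB] at this; simp at this
        | some p =>
          rw [hA] at this
          cases hB : findBloop f v ht (path ++ [n]) with
          | none => rw [hB] at this; simp at this
          | some q => rw [hB] at this; simp at this; simp [this]

-- ===== VERDICT (by name: the statement is the Claim_ definition above) =====
theorem find_spec : Claim_equal_find := by
  intro n ht _ _
  unfold Spec_find find find_alt
  have h := findA_fst_eq_findBloop (ht.length + 1) n (PySem.Dict.mk ht) []
  cases hA : findA (ht.length + 1) n (PySem.Dict.mk ht) with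
  | none =>
    rw [hA] at h
    cases hB : findBloop (ht.length + 1) n (PySem.Dict.mk ht) [] with
    | none => rfl
    | some q => rw [hB] at h; simp at h
  | some p =>
    rw [hA] at h
    cases hB : findBloop (ht.length + 1) n (PySem.Dict.mk ht) [] with
    | none => rw [hB] at h; simp at h
    | some q => rw [hB] at h; simp at h; simp [h]
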